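-- pv_equiv track=rewrite | github.com/pinkdahlia2001/Python_Crash_Course | functions/drills.py | add_new_animal
-- ===== SOURCE A (Python) =====
-- def add_new_animal(animals):
--     new_animals = []
--
--     while animals:
--         animal = animals.pop()
--         new_animal = new_animals.append(animal)
--
--     return new_animals
--     for new_animal in new_animals:
--         animals.append(new_animal)
-- ===== SOURCE B (Python) =====
-- def add_new_animal(animals):
--     new_animals = animals[::-1]
--     animals.clear()
--     return new_animals
-- ===== Notes on version B (the rewrite author's own statement) =====
-- stated objective: simpler
-- what changed: Replaces the element-by-element pop/append while-loop with a one-step reversed slice animals[::-1] followed by a single in-place clear(), separating the reversal from the mutation.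
import Mathlib
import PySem

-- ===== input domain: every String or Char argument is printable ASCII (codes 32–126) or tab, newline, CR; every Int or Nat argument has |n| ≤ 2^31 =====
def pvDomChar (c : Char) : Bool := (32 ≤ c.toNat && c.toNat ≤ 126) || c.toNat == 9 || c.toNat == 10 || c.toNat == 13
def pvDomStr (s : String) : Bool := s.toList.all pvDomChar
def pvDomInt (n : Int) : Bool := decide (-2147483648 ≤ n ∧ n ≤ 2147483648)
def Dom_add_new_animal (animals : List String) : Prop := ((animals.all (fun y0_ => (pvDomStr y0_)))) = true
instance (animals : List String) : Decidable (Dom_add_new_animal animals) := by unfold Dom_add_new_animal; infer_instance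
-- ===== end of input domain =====

-- ===== PORT A =====
-- B performs the same in-place mutation as A (the argument ends up empty); the equivalence proved here is about the return value.
-- while animals: animal = animals.pop(); new_animals.append(animal)
def add_new_animal_loop (animals new_animals : List String) : List String :=
  match animals with
  | [] => new_animals
  | a :: t => add_new_animal_loop (a :: t).dropLast (new_animals ++ [(a :: t).getLast!])
termination_by animals.length
decreasing_by simp

def add_new_animal (animals : List String) : List String :=
  add_new_animal_loop animals []

-- ===== PORT B =====
-- new_animals = animals[::-1]; animals.clear(); return new_animals
def add_new_animal_alt (animals : List String) : List String :=
  (PySem.List.slice? animals none none (-1)).getD []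

-- ===== PRECONDITION & SPEC =====
def Spec_add_new_animal (animals : List String) (out : List String) : Prop := out = add_new_animal_alt animals
instance (animals : List String) (out : List String) : Decidable (Spec_add_new_animal animals out) := by unfold Spec_add_new_animal; infer_instance

-- ===== CLAIM (what is proved, stated in full; the proofs are below) =====
def Claim_equal_add_new_animal : Prop := ∀ (animals : List String), Dom_add_new_animal animals → Spec_add_new_animal animals (add_new_animal animals)

-- ===== LEMMAS AND PROOFS =====
theorem add_new_animal_loop_eq : ∀ (n : Nat) (xs acc : List String), xs.length = n →
    add_new_animal_loop xs acc = acc ++ xs.reverse := by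
  intro n
  induction n with
  | zero => intro xs acc h; cases xs with
    | nil => rw [add_new_animal_loop]; simp
    | cons a t => simp at h
  | succ k ih =>
    intro xs acc h
    cases hx : xs with
    | nil => simp [hx] at h
    | cons a t =>
      subst hx
      have hne : (a :: t) ≠ ([] : List String) := by simp
      rw [add_new_animal_loop,
        ih (a :: t).dropLast _ (by simp at h ⊢; omega), List.append_assoc]
      congr 1
      have hc := List.dropLast_concat_getLast hne
      conv_rhs => rw [← hc]
      simp [List.getLast?_eq_some_getLast hne]

-- ===== VERDICT (by name: the statement is the Claim_ definition above) =====
theorem add_new_animal_spec : Claim_equal_add_new_animal := by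
  intro animals _
  unfold Spec_add_new_animal add_new_animal add_new_animal_alt
  rw [PySem.List.slice?_none_none_neg_one, add_new_animal_loop_eq animals.length animals [] rfl]
  simp
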